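-- pv_equiv track=rewrite | github.com/Pradeep-Deep14/Sep-9_24 | 6.py | nested_to_flattened_without_duplicates
-- ===== SOURCE A (Python) =====
-- def nested_to_flattened_without_duplicates(L):
--     seen=set()
--     Flattened=[]
--     for i in L:
--         if isinstance(i,list):
--             for item in i:
--                 if item not in seen:
--                     Flattened.append(item)
--                     seen.add(item)
--         else:
--             if i not in seen:
--                 Flattened.append(i)
--                 seen.add(i)
--     return Flattened
-- ===== SOURCE B (Python) =====
-- def nested_to_flattened_without_duplicates(L):
--     flat = []
--     for i in L:
--         if isinstance(i, list):
--             flat.extend(i)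
--         else:
--             flat.append(i)
--     return [x for k, x in enumerate(flat) if flat.index(x) == k]
-- ===== Notes on version B (the rewrite author's own statement) =====
-- stated objective: alternative
-- what changed: A's single interleaved loop with an auxiliary seen-set is replaced by a flatten pass followed by a first-occurrence filter that keeps flat[k] exactly when flat.index(x) == k, i.e. membership is decided by scanning the list itself instead of maintaining any seen structure.
import Mathlib
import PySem

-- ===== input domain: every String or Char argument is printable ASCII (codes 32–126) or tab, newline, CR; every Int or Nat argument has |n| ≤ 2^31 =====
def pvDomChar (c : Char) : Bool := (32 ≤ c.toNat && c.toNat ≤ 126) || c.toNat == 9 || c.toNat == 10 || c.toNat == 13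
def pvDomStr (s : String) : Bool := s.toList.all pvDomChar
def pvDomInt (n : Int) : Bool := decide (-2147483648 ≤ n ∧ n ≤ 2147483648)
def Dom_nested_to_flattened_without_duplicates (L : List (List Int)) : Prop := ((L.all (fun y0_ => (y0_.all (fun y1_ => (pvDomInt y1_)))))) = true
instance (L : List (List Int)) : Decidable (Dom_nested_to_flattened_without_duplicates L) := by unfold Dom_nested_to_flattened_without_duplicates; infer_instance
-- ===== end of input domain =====

-- B replaces A's single interleaved loop with its auxiliary seen-set by a flatten pass followed
-- by a first-occurrence filter (keep flat[k] iff flat.index(flat[k]) == k): no seen structure at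
-- all, membership decided by scanning the flat list itself; objective: alternative (not faster).

-- ===== PORT A =====
-- Under the type List (List Int) every element of L is a list, so the isinstance branch is always taken.
def nested_to_flattened_without_duplicates (L : List (List Int)) : List Int :=
  (L.foldl (fun st i =>
      i.foldl (fun st item =>
        if PySem.Set.contains st.1 item then st
        else (PySem.Set.add st.1 item, st.2 ++ [item])) st)
    ((PySem.Set.empty : PySem.Set Int), ([] : List Int))).2

-- ===== PORT B =====
def nested_to_flattened_without_duplicates_alt (L : List (List Int)) : List Int :=
  let flat := L.foldl (fun acc i => acc ++ i) ([] : List Int)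
  -- [x for k, x in enumerate(flat) if flat.index(x) == k]
  ((PySem.List.enumerate flat).filter
      (fun p => (PySem.List.index? flat p.2).map (fun n : Nat => (n : Int)) == some p.1)).map (·.2)

-- ===== PRECONDITION & SPEC =====
def Spec_nested_to_flattened_without_duplicates (L : List (List Int)) (out : List Int) : Prop := out = nested_to_flattened_without_duplicates_alt L
instance (L : List (List Int)) (out : List Int) : Decidable (Spec_nested_to_flattened_without_duplicates L out) := by unfold Spec_nested_to_flattened_without_duplicates; infer_instance

-- ===== CLAIM (what is proved, stated in full; the proofs are below) =====
def Claim_equal_nested_to_flattened_without_duplicates : Prop := ∀ (L : List (List Int)), Dom_nested_to_flattened_without_duplicates L → Spec_nested_to_flattened_without_duplicates L (nested_to_flattened_without_duplicates L)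

-- ===== LEMMAS AND PROOFS =====

-- proof-side reference function: first-occurrence dedup of xs relative to the already-seen prefix
def pvDedup (pre : PySem.Set Int) : List Int → List Int
  | [] => []
  | x :: xs =>
      if PySem.Set.contains pre x then pvDedup (PySem.Set.add pre x) xs
      else x :: pvDedup (PySem.Set.add pre x) xs

-- pvDedup only depends on the membership of the seen prefix
theorem pvDedup_congr (xs : List Int) (p q : PySem.Set Int)
    (h : ∀ a : Int, a ∈ p ↔ a ∈ q) : pvDedup p xs = pvDedup q xs := by
  induction xs generalizing p q with
  | nil => rfl
  | cons x xs ih =>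
      have hc : PySem.Set.contains p x = PySem.Set.contains q x := by
        by_cases hp : x ∈ p
        · rw [(PySem.Set.contains_iff _ _).mpr hp, ((PySem.Set.contains_iff _ _).mpr ((h x).mp hp)).symm]
        · have hq : x ∉ q := fun hmq => hp ((h x).mpr hmq)
          have h1 : PySem.Set.contains p x = false := by
            cases hcase : PySem.Set.contains p x
            · rfl
            · exact absurd ((PySem.Set.contains_iff _ _).mp hcase) hp
          have h2 : PySem.Set.contains q x = false := by
            cases hcase : PySem.Set.contains q x
            · rfl
            · exact absurd ((PySem.Set.contains_iff _ _).mp hcase) hq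
          rw [h1, h2]
      have hmemadd : ∀ a : Int, a ∈ PySem.Set.add p x ↔ a ∈ PySem.Set.add q x := by
        intro a
        simp only [PySem.Set.add]
        by_cases hp : PySem.Set.contains p x
        · rw [if_pos hp, if_pos (hc ▸ hp)]
          exact h a
        · rw [if_neg hp, if_neg (fun hq => hp (hc ▸ hq))]
          simp only [List.mem_append, List.mem_singleton]
          exact or_congr (h a) Iff.rfl
      simp only [pvDedup, hc]
      by_cases hq : PySem.Set.contains q x
      · rw [if_pos hq, if_pos hq, ih _ _ hmemadd]
      · rw [if_neg hq, if_neg hq, ih _ _ hmemadd]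

-- A's per-item step, started from a state whose seen-set equals its output list,
-- keeps the two components equal and acts as Set.add on both.
theorem pv_inner_foldl (xs : List Int) (s : PySem.Set Int) :
    xs.foldl (fun st item =>
        if PySem.Set.contains st.1 item then st
        else (PySem.Set.add st.1 item, st.2 ++ [item])) (s, s)
      = (xs.foldl PySem.Set.add s, xs.foldl PySem.Set.add s) := by
  induction xs generalizing s with
  | nil => rfl
  | cons x xs ih =>
      simp only [List.foldl_cons]
      have h : (if PySem.Set.contains s x then (s, s)
                else (PySem.Set.add s x, s ++ [x]))
          = ((PySem.Set.add s x : PySem.Set Int), (PySem.Set.add s x : List Int)) := by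
        simp only [PySem.Set.add]
        split_ifs <;> rfl
      rw [h, ih]

-- the nested loop over L equals the flat loop over L.flatten
theorem pv_outer_foldl (L : List (List Int)) (s : PySem.Set Int) :
    (L.foldl (fun st i =>
        i.foldl (fun st item =>
          if PySem.Set.contains st.1 item then st
          else (PySem.Set.add st.1 item, st.2 ++ [item])) st) (s, s))
      = (L.flatten.foldl PySem.Set.add s, L.flatten.foldl PySem.Set.add s) := by
  induction L generalizing s with
  | nil => rfl
  | cons i L ih =>
      simp only [List.foldl_cons, List.flatten_cons, List.foldl_append]
      rw [pv_inner_foldl, ih]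

theorem pv_foldl_append (L : List (List Int)) (acc : List Int) :
    L.foldl (fun a i => a ++ i) acc = acc ++ L.flatten := by
  induction L generalizing acc with
  | nil => simp
  | cons i L ih => simp [List.foldl_cons, ih, List.append_assoc]

-- A's seen-set fold is the reference dedup
theorem pv_A_eq_dedup (xs : List Int) (pre : PySem.Set Int) :
    xs.foldl PySem.Set.add pre = pre ++ pvDedup pre xs := by
  induction xs generalizing pre with
  | nil => simp [pvDedup]
  | cons x xs ih =>
      simp only [List.foldl_cons, pvDedup]
      by_cases h : PySem.Set.contains pre x
      · have hadd : PySem.Set.add pre x = pre := by simp only [PySem.Set.add, if_pos h]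
        rw [ih, hadd, if_pos h]
      · have hadd : PySem.Set.add pre x = pre ++ [x] := by simp only [PySem.Set.add, if_neg h]
        rw [ih, hadd, if_neg h]
        simp [List.append_assoc]

-- B's index-filter over the flat list is the reference dedup
theorem pv_B_eq_dedup (xs pre : List Int) :
    ((PySem.List.enumerate xs (pre.length : Int)).filter
        (fun p => (PySem.List.index? (pre ++ xs) p.2).map (fun n : Nat => (n : Int)) == some p.1)).map (·.2)
      = pvDedup pre xs := by
  induction xs generalizing pre with
  | nil => simp [PySem.List.enumerate_nil, pvDedup]
  | cons x xs ih =>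
      rw [PySem.List.enumerate_cons]
      have hsplit : pre ++ x :: xs = (pre ++ [x]) ++ xs := by simp
      have hlen : (pre.length : Int) + 1 = (((pre ++ [x]).length : Nat) : Int) := by
        simp
      have htail :
          ((PySem.List.enumerate xs ((pre.length : Int) + 1)).filter
              (fun p => (PySem.List.index? (pre ++ x :: xs) p.2).map (fun n : Nat => (n : Int)) == some p.1)).map (·.2)
            = pvDedup (pre ++ [x]) xs := by
        rw [hsplit, hlen]
        exact ih (pre ++ [x])
      by_cases hmem : x ∈ pre
      · -- head is dropped: the first occurrence of x is inside pre, at an index < pre.length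
        obtain ⟨j, hj⟩ := Option.isSome_iff_exists.mp ((PySem.List.index?_isSome_iff _ _).mpr hmem)
        have hjlt : j < pre.length := by
          rcases PySem.List.getElem_of_index?_eq_some hj with ⟨hk, _, _⟩
          exact hk
        have hidx : PySem.List.index? (pre ++ x :: xs) x = some j :=
          by rw [PySem.List.index?_append_of_mem _ hmem, hj]
        have hcond : ((PySem.List.index? (pre ++ x :: xs) x).map (fun n : Nat => (n : Int)) == some ((pre.length : Nat) : Int)) = false := by
          rw [hidx]
          simp only [Option.map_some, beq_eq_false_iff_ne, ne_eq, Option.some.injEq]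
          intro hEq
          have : j = pre.length := by exact_mod_cast hEq
          omega
        have hcontains : PySem.Set.contains pre x = true := (PySem.Set.contains_iff _ _).mpr hmem
        have haddeq : PySem.Set.add pre x = pre := by simp only [PySem.Set.add, if_pos hcontains]
        have hcongr : pvDedup (PySem.Set.add pre x) xs = pvDedup (pre ++ [x]) xs := by
          apply pvDedup_congr
          intro a
          rw [haddeq]
          simp only [List.mem_append, List.mem_singleton]
          constructor
          · exact Or.inl
          · rintro (ha | rfl)
            · exact ha
            · exact hmem
        rw [List.filter_cons_of_neg (by simpa using hcond)]
        rw [htail]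
        simp [pvDedup, hcongr]
        exact hmem
      · -- head is kept: its first occurrence in pre ++ x :: xs is at index pre.length
        have hidx : PySem.List.index? (pre ++ x :: xs) x = some pre.length :=
          (PySem.List.index?_eq_some_iff _ _ _).mpr ⟨pre, xs, rfl, rfl, hmem⟩
        have hcond : ((PySem.List.index? (pre ++ x :: xs) x).map (fun n : Nat => (n : Int)) == some ((pre.length : Nat) : Int)) = true := by
          rw [hidx]
          simp
        have hncontains : PySem.Set.contains pre x = false := by
          cases hcase : PySem.Set.contains pre x
          · rfl
          · exact absurd ((PySem.Set.contains_iff _ _).mp hcase) hmem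
        have haddeq : PySem.Set.add pre x = pre ++ [x] := by
          simp only [PySem.Set.add, hncontains]
          exact if_neg (by simp)
        rw [List.filter_cons_of_pos (by simpa using hcond)]
        rw [List.map_cons, htail]
        simp [pvDedup, haddeq]
        exact hmem

-- ===== VERDICT (by name: the statement is the Claim_ definition above) =====
theorem nested_to_flattened_without_duplicates_spec : Claim_equal_nested_to_flattened_without_duplicates := by
  intro L _
  unfold Spec_nested_to_flattened_without_duplicates
  unfold nested_to_flattened_without_duplicates nested_to_flattened_without_duplicates_alt
  rw [show (PySem.Set.empty : PySem.Set Int) = ([] : List Int) from rfl, pv_outer_foldl, pv_foldl_append]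
  have hB := pv_B_eq_dedup L.flatten []
  have hA := pv_A_eq_dedup L.flatten ([] : PySem.Set Int)
  simp only [List.nil_append, List.length_nil, Nat.cast_zero] at hB hA
  simp only [List.nil_append]
  rw [hA, ← hB]
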